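-- pv_equiv track=rewrite | github.com/grasshopperTrainer/coding_practice | baekjoon/accepted/17144 미세먼지 안녕!.py | get_lower_path
-- ===== SOURCE A (Python) =====
-- def get_lower_path(ox, oy, R, C):
--     path = []
--     for y in range(1, C):
--         path.append((ox, y))
--     for x in range(ox + 1, R):
--         path.append((x, C - 1))
--     for y in range(C - 2, -1, -1):
--         path.append((R - 1, y))
--     for x in range(R - 2, ox, -1):
--         path.append((x, 0))
--     return path
-- ===== SOURCE B (Python) =====
-- def get_lower_path(ox, oy, R, C):
--     # one arithmetic pass: segment lengths + index->coordinate formula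
--     l1 = max(C - 1, 0)           # along row ox, cols 1..C-1
--     l2 = max(R - ox - 1, 0)      # down right edge
--     l3 = max(C - 1, 0)           # along bottom row, right to left
--     l4 = max(R - ox - 2, 0)      # up left edge, stopping above ox
--
--     def at(t):
--         if t < l1:
--             return (ox, 1 + t)
--         t -= l1
--         if t < l2:
--             return (ox + 1 + t, C - 1)
--         t -= l2
--         if t < l3:
--             return (R - 1, C - 2 - t)
--         t -= l3
--         return (R - 2 - t, 0)
--
--     return [at(t) for t in range(l1 + l2 + l3 + l4)]
-- ===== Notes on version B (the rewrite author's own statement) =====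
-- stated objective: alternative
-- what changed: Replaces the four separate append loops by a single map over one index range, computing each coordinate from the flat index by closed-form segment arithmetic.
import Mathlib
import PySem

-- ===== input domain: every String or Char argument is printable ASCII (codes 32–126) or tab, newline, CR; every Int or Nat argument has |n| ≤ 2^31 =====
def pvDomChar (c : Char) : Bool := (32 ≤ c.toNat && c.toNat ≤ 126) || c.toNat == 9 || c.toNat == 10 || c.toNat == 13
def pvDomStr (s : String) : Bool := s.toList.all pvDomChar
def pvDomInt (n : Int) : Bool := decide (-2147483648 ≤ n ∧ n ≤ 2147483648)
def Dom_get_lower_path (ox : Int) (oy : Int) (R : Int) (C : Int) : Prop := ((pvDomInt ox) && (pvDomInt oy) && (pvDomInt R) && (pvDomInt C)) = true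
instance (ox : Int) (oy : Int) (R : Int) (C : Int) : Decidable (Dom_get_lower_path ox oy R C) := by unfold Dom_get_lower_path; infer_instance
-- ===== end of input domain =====

-- B replaces A's four append loops by one map over a single index range with a
-- closed-form index->coordinate formula (objective: alternative decomposition).

-- ===== PORT A =====
def get_lower_path (ox : Int) (oy : Int) (R : Int) (C : Int) : List (Int × Int) :=
  let path : List (Int × Int) := []
  let path := (PySem.List.pyRange 1 C 1).foldl (fun acc y => acc ++ [(ox, y)]) path
  let path := (PySem.List.pyRange (ox + 1) R 1).foldl (fun acc x => acc ++ [(x, C - 1)]) path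
  let path := (PySem.List.pyRange (C - 2) (-1) (-1)).foldl (fun acc y => acc ++ [(R - 1, y)]) path
  let path := (PySem.List.pyRange (R - 2) ox (-1)).foldl (fun acc x => acc ++ [(x, 0)]) path
  path

-- ===== PORT B =====
-- the inner 'at' of Source B
def pvAt (ox R C l1 l2 l3 : Int) (t : Int) : Int × Int :=
  if t < l1 then (ox, 1 + t)
  else
    let t := t - l1
    if t < l2 then (ox + 1 + t, C - 1)
    else
      let t := t - l2
      if t < l3 then (R - 1, C - 2 - t)
      else
        let t := t - l3
        (R - 2 - t, 0)

def get_lower_path_alt (ox : Int) (oy : Int) (R : Int) (C : Int) : List (Int × Int) :=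
  let l1 := max (C - 1) 0
  let l2 := max (R - ox - 1) 0
  let l3 := max (C - 1) 0
  let l4 := max (R - ox - 2) 0
  (PySem.List.pyRange 0 (l1 + l2 + l3 + l4) 1).map (pvAt ox R C l1 l2 l3)

-- ===== PRECONDITION & SPEC =====
def Spec_get_lower_path (ox : Int) (oy : Int) (R : Int) (C : Int) (out : List (Int × Int)) : Prop := out = get_lower_path_alt ox oy R C
instance (ox : Int) (oy : Int) (R : Int) (C : Int) (out : List (Int × Int)) : Decidable (Spec_get_lower_path ox oy R C out) := by unfold Spec_get_lower_path; infer_instance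

-- ===== CLAIM (what is proved, stated in full; the proofs are below) =====
def Claim_equal_get_lower_path : Prop := ∀ (ox : Int) (oy : Int) (R : Int) (C : Int), Dom_get_lower_path ox oy R C → Spec_get_lower_path ox oy R C (get_lower_path ox oy R C)

-- ===== LEMMAS AND PROOFS =====

-- common normal form: four maps over List.range, right-associated
def pvNF (ox R C : Int) : List (Int × Int) :=
  (List.range (C - 1).toNat).map (fun k : Nat => (ox, 1 + (k : Int)))
  ++ ((List.range (R - ox - 1).toNat).map (fun k : Nat => (ox + 1 + (k : Int), C - 1))
  ++ ((List.range (C - 1).toNat).map (fun k : Nat => (R - 1, C - 2 - (k : Int)))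
  ++ (List.range (R - ox - 2).toNat).map (fun k : Nat => (R - 2 - (k : Int), 0))))

-- A's append-loop is a map
theorem pv_foldl_app {α β : Type} (f : α → β) :
    ∀ (l : List α) (acc : List β),
      l.foldl (fun a y => a ++ [f y]) acc = acc ++ l.map f := by
  intro l
  induction l with
  | nil => simp
  | cons x xs ih => intro acc; simp [List.foldl, ih]

theorem pv_a_nf (ox oy R C : Int) : get_lower_path ox oy R C = pvNF ox R C := by
  have e2 : (R - (ox + 1) : Int) = R - ox - 1 := by ring
  have e3 : (C - 2 - (-1) : Int) = C - 1 := by ring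
  have e4 : (R - 2 - ox : Int) = R - ox - 2 := by ring
  simp only [get_lower_path, pv_foldl_app, PySem.List.pyRange_one, PySem.List.pyRange_neg_one,
    e2, e3, e4, List.map_map, List.nil_append, List.append_assoc, pvNF]
  rfl

theorem pv_b_nf (ox oy R C : Int) : get_lower_path_alt ox oy R C = pvNF ox R C := by
  simp only [get_lower_path_alt, PySem.List.pyRange_one]
  have htot : (max (C - 1) 0 + max (R - ox - 1) 0 + max (C - 1) 0 + max (R - ox - 2) 0 - 0).toNat
      = (C - 1).toNat + ((R - ox - 1).toNat + ((C - 1).toNat + (R - ox - 2).toNat)) := by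
    omega
  rw [htot, List.range_add, List.range_add, List.range_add]
  simp only [List.map_append, List.map_map]
  unfold pvNF
  congr 1
  · apply List.map_congr_left
    intro k hk
    simp only [List.mem_range] at hk
    simp only [Function.comp, pvAt]
    rw [if_pos (by omega)]
    simp
  congr 1
  · apply List.map_congr_left
    intro k hk
    simp only [List.mem_range] at hk
    simp only [Function.comp, pvAt]
    rw [if_neg (by push_cast; omega), if_pos (by push_cast; omega)]
    refine Prod.ext ?_ rfl
    push_cast; ring_nf; omega
  congr 1
  · apply List.map_congr_left
    intro k hk
    simp only [List.mem_range] at hk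
    simp only [Function.comp, pvAt]
    rw [if_neg (by push_cast; omega), if_neg (by push_cast; omega), if_pos (by push_cast; omega)]
    refine Prod.ext rfl ?_
    push_cast; ring_nf; omega
  · apply List.map_congr_left
    intro k hk
    simp only [List.mem_range] at hk
    simp only [Function.comp, pvAt]
    rw [if_neg (by push_cast; omega), if_neg (by push_cast; omega), if_neg (by push_cast; omega)]
    refine Prod.ext ?_ rfl
    push_cast; ring_nf; omega

-- ===== VERDICT (by name: the statement is the Claim_ definition above) =====
theorem get_lower_path_spec : Claim_equal_get_lower_path := by
  intro ox oy R C _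
  unfold Spec_get_lower_path
  rw [pv_a_nf ox oy R C, pv_b_nf ox oy R C]
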